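-- pv_equiv track=rewrite | github.com/Shivani-Niranjan/HelpFromSam | HelpFromSam.py | HelpFromSam
-- ===== SOURCE A (Python) =====
-- def HelpFromSam(target):
--     score = 1
--     help = 0
--
--     while score < target:
--         if score * 2 <= target:
--             score *= 2
--         else:
--             score += 1
--             help += 1
--
--     return help+1
-- ===== SOURCE B (Python) =====
-- def HelpFromSam(target):
--     if target <= 1:
--         return 1
--     p = 1 << (target.bit_length() - 1)   # largest power of two <= target
--     return target - p + 1
-- ===== Notes on version B (the rewrite author's own statement) =====
-- stated objective: faster
-- what changed: Replaced the linear doubling/incrementing loop by a closed form: the answer is target minus the largest power of two not exceeding it, plus one (computed via bit_length), with the trivial base case handled directly.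
import Mathlib
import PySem

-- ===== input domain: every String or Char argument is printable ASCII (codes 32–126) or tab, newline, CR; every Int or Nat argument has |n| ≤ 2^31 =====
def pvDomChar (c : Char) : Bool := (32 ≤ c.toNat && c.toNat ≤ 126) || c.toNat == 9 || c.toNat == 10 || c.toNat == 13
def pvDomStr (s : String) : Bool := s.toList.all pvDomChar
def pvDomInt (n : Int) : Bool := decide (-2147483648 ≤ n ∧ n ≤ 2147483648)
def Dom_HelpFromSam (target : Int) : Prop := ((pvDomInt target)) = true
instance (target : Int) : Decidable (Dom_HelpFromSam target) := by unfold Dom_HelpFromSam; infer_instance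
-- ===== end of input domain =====

-- B replaces A's O(target) doubling/incrementing loop by the O(1) closed form
-- target - 2^(bit_length(target)-1) + 1 (objective: faster, asymptotic).

-- ===== PORT A =====
-- A's while-loop; fuel bounds the iteration count (score grows by ≥ 1 each step from 1),
-- state (score, help) exactly as in the Python.
def HelpFromSamLoop : Nat → Int → Int → Int → Int
  | 0, _, _, help => help + 1
  | n + 1, target, score, help =>
    if score < target then
      if score * 2 ≤ target then HelpFromSamLoop n target (score * 2) help
      else HelpFromSamLoop n target (score + 1) (help + 1)
    else help + 1

def HelpFromSam (target : Int) : Int :=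
  HelpFromSamLoop (target - 1).toNat target 1 0

-- ===== PORT B =====
-- 1 << (target.bit_length() - 1) for a positive int is 2 ^ Nat.log2 target.toNat (exact there).
def HelpFromSam_alt (target : Int) : Int :=
  if target ≤ 1 then 1
  else target - 2 ^ Nat.log2 target.toNat + 1

-- ===== PRECONDITION & SPEC =====
def Spec_HelpFromSam (target : Int) (out : Int) : Prop := out = HelpFromSam_alt target
instance (target : Int) (out : Int) : Decidable (Spec_HelpFromSam target out) := by unfold Spec_HelpFromSam; infer_instance

-- ===== CLAIM (what is proved, stated in full; the proofs are below) =====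
def Claim_equal_HelpFromSam : Prop := ∀ (target : Int), Dom_HelpFromSam target → Spec_HelpFromSam target (HelpFromSam target)

-- ===== LEMMAS AND PROOFS =====

-- Once doubling is impossible (target < 2*score) it stays impossible: only increments remain.
theorem loop_inc (n : Nat) : ∀ (target score help : Int),
    (target - score).toNat ≤ n → target < score * 2 →
    HelpFromSamLoop n target score help = help + ((target - score).toNat : Int) + 1 := by
  induction n with
  | zero =>
    intro target score help hfuel _
    have : (target - score).toNat = 0 := Nat.le_zero.mp hfuel
    simp [HelpFromSamLoop, this]
  | succ n ih =>
    intro target score help hfuel hlt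
    by_cases h : score < target
    · have hnd : ¬ (score * 2 ≤ target) := by omega
      have h1 : (target - (score + 1)).toNat ≤ n := by omega
      have h2 : target < (score + 1) * 2 := by omega
      simp only [HelpFromSamLoop, if_pos h, if_neg hnd]
      rw [ih target (score + 1) (help + 1) h1 h2]
      omega
    · simp only [HelpFromSamLoop, if_neg h]
      omega

-- Doubling phase: from score = 2^k with 2^k ≤ target, the loop reaches 2^(log2 target).
theorem loop_dbl (d : Nat) : ∀ (target : Int) (k : Nat) (n : Nat) (help : Int),
    2 ≤ target → k + d = Nat.log2 target.toNat → (2 : Int) ^ k ≤ target →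
    (target - 2 ^ k).toNat ≤ n →
    HelpFromSamLoop n target (2 ^ k) help
      = help + (target - 2 ^ Nat.log2 target.toNat) + 1 := by
  induction d with
  | zero =>
    intro target k n help h2 hk hle hfuel
    have hkl : k = Nat.log2 target.toNat := by omega
    subst hkl
    have hub : target.toNat < 2 ^ (Nat.log2 target.toNat + 1) := Nat.lt_log2_self
    have hub' : target < 2 ^ (Nat.log2 target.toNat + 1) := by
      have := Int.toNat_of_nonneg (by omega : (0:Int) ≤ target)
      calc target = (target.toNat : Int) := this.symm
        _ < ((2 ^ (Nat.log2 target.toNat + 1) : Nat) : Int) := by exact_mod_cast hub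
        _ = 2 ^ (Nat.log2 target.toNat + 1) := by push_cast; ring
    have hlt2 : target < (2 : Int) ^ Nat.log2 target.toNat * 2 := by
      have : (2 : Int) ^ (Nat.log2 target.toNat + 1) = 2 ^ Nat.log2 target.toNat * 2 := by ring
      omega
    rw [loop_inc n target _ help hfuel hlt2]
    omega
  | succ d ih =>
    intro target k n help h2 hk hle hfuel
    have hkl : k < Nat.log2 target.toNat := by omega
    have hsucc : (2 : Int) ^ (k + 1) ≤ target := by
      have h1 : 2 ^ (k + 1) ≤ 2 ^ Nat.log2 target.toNat :=
        Nat.pow_le_pow_right (by omega) (by omega)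
      have h2' : 2 ^ Nat.log2 target.toNat ≤ target.toNat :=
        Nat.log2_self_le (by omega)
      have h3 : ((2 ^ (k + 1) : Nat) : Int) ≤ (target.toNat : Int) := by
        exact_mod_cast le_trans h1 h2'
      have := Int.toNat_of_nonneg (by omega : (0:Int) ≤ target)
      calc (2 : Int) ^ (k + 1) = ((2 ^ (k + 1) : Nat) : Int) := by push_cast; ring
        _ ≤ (target.toNat : Int) := h3
        _ = target := this
    have hpos : (0 : Int) < 2 ^ k := by positivity
    have hpow2 : (2 : Int) ^ (k + 1) = 2 ^ k * 2 := by ring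
    have hcond : (2 : Int) ^ k * 2 ≤ target := by omega
    have hscore : (2 : Int) ^ k < target := by omega
    obtain ⟨m, hm⟩ : ∃ m, n = m + 1 := by
      cases n with
      | zero => exfalso; omega
      | succ m => exact ⟨m, rfl⟩
    subst hm
    simp only [HelpFromSamLoop, if_pos hscore, if_pos hcond]
    have := ih target (k + 1) m help h2 (by omega) hsucc (by omega)
    rw [← hpow2, this]

-- ===== VERDICT (by name: the statement is the Claim_ definition above) =====
theorem HelpFromSam_spec : Claim_equal_HelpFromSam := by
  intro target _
  unfold Spec_HelpFromSam HelpFromSam HelpFromSam_alt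
  by_cases h1 : target ≤ 1
  · have hz : (target - 1).toNat = 0 := by omega
    rw [hz]
    simp [HelpFromSamLoop, if_pos h1]
  · have h2 : 2 ≤ target := by omega
    have hpow : (2 : Int) ^ (0 : Nat) ≤ target := by norm_num; omega
    have := loop_dbl (Nat.log2 target.toNat) target 0 (target - 1).toNat 0 h2
      (by omega) hpow (by norm_num)
    norm_num at this
    have hfuel : (target - 1).toNat = target.toNat - 1 := by omega
    rw [hfuel, this, if_neg h1]
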